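-- pv_equiv track=rewrite | github.com/wenzongzhi/BCH-Stratum-Proxy | bch_stratum_proxy.py | _encode_height_to_coinbase
-- ===== SOURCE A (Python) =====
-- import binascii
--
-- def bytes_to_hex(b: bytes) -> str:
--     return binascii.hexlify(b).decode('ascii')
--
-- def _encode_height_to_coinbase(height: int) -> str:
--     hb = b''
--     n = height
--     while True:
--         hb += bytes([n & 0xff])
--         n >>= 8
--         if n == 0:
--             break
--     return bytes_to_hex(bytes([len(hb)])) + bytes_to_hex(hb)
-- ===== SOURCE B (Python) =====
-- def _encode_height_to_coinbase(height: int) -> str: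
--     byte_len = max(1, (height.bit_length() + 7) // 8)
--     payload = height.to_bytes(byte_len, 'little')
--     return bytes([byte_len]).hex() + payload.hex()
-- ===== Notes on version B (the rewrite author's own statement) =====
-- stated objective: idiomatic
-- what changed: Replaces A's per-byte mask/shift accumulation loop with a closed-form byte-length computation (bit_length) and a single bulk int.to_bytes little-endian conversion.
import Mathlib
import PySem

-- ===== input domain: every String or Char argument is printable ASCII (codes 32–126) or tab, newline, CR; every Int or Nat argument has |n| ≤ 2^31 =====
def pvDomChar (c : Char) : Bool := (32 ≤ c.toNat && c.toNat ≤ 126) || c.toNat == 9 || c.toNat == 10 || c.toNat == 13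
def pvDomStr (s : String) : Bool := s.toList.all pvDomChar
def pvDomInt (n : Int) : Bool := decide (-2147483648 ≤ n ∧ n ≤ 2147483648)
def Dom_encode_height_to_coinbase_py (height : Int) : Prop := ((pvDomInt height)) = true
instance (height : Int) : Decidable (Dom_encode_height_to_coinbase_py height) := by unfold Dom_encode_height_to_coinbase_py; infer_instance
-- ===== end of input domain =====

-- B replaces A's per-byte mask/shift loop with a closed-form byte length (bit_length)
-- plus one bulk little-endian conversion (the idiomatic int.to_bytes form).
-- Equality is about the RETURN value; on negative heights A loops forever (excluded by Pre_).

-- ===== PORT A =====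

-- one hex digit (lowercase), as binascii.hexlify produces
def pvHexDigit (n : Nat) : Char :=
  if n < 10 then Char.ofNat (48 + n) else Char.ofNat (87 + n)

-- hex of one byte (two lowercase digits); exact for 0 ≤ b < 256
def pvByteHex (b : Nat) : List Char :=
  [pvHexDigit (b / 16), pvHexDigit (b % 16)]

-- A's while-loop: emit (n & 0xff), shift n >>= 8, stop when n = 0.
def pvALoop (n : Nat) : List Nat :=
  if h : n / 256 = 0 then [n % 256]
  else (n % 256) :: pvALoop (n / 256)
decreasing_by exact Nat.div_lt_self (Nat.pos_of_ne_zero (by omega)) (by omega)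

def encode_height_to_coinbase_py (height : Int) : String :=
  let hb := pvALoop height.toNat
  String.ofList (pvByteHex hb.length ++ (hb.map pvByteHex).flatten)

-- ===== PORT B =====

-- Python int.bit_length for n ≥ 0
def pvBitLength (n : Nat) : Nat := if n = 0 then 0 else Nat.log2 n + 1

-- height.to_bytes(byteLen, 'little'): i-th byte is (n >> 8i) & 0xff
def pvToBytesLE (n len : Nat) : List Nat :=
  (List.range len).map (fun i => (n >>> (8 * i)) % 256)

def encode_height_to_coinbase_py_alt (height : Int) : String :=
  -- height.to_bytes raises OverflowError for height < 0 (outside Pre_); dummy value there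
  if height < 0 then "" else
  let n := height.toNat
  let byteLen := max 1 ((pvBitLength n + 7) / 8)
  let payload := pvToBytesLE n byteLen
  String.ofList (pvByteHex byteLen ++ (payload.map pvByteHex).flatten)

-- ===== PRECONDITION & SPEC =====
-- Pre_ excludes negative heights: there A's while-loop never terminates (n >>= 8 stays negative).
def Pre_encode_height_to_coinbase_py (height : Int) : Prop := 0 ≤ height
instance (height : Int) : Decidable (Pre_encode_height_to_coinbase_py height) := by
  unfold Pre_encode_height_to_coinbase_py; infer_instance

def pvWitness_encode_height_to_coinbase_py : Int := (123456)

def Spec_encode_height_to_coinbase_py (height : Int) (out : String) : Prop := out = encode_height_to_coinbase_py_alt height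
instance (height : Int) (out : String) : Decidable (Spec_encode_height_to_coinbase_py height out) := by unfold Spec_encode_height_to_coinbase_py; infer_instance

-- ===== CLAIM (what is proved, stated in full; the proofs are below) =====
def Claim_equal_encode_height_to_coinbase_py : Prop := ∀ (height : Int), Dom_encode_height_to_coinbase_py height → Pre_encode_height_to_coinbase_py height → Spec_encode_height_to_coinbase_py height (encode_height_to_coinbase_py height)

-- ===== LEMMAS AND PROOFS =====

-- closed form for B's byte length
def pvByteLen (n : Nat) : Nat := max 1 ((pvBitLength n + 7) / 8)

lemma pvByteLen_small {n : Nat} (h : n / 256 = 0) : pvByteLen n = 1 := by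
  have hn : n < 256 := by omega
  unfold pvByteLen pvBitLength
  split
  · simp
  · have : Nat.log2 n < 8 := by
      have := Nat.log2_lt (by omega : n ≠ 0) |>.2 (by omega : n < 2 ^ 8)
      exact this
    omega

lemma pvByteLen_step {n : Nat} (h : n / 256 ≠ 0) :
    pvByteLen n = pvByteLen (n / 256) + 1 := by
  have hn : 256 ≤ n := by
    by_contra hc
    exact h (Nat.div_eq_of_lt (by omega))
  have hlog : Nat.log2 n = Nat.log2 (n / 256) + 8 := by
    have step : ∀ m : Nat, 2 ≤ m → Nat.log2 m = Nat.log2 (m / 2) + 1 := by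
      intro m hm
      have h1 : 1 ≤ Nat.log2 m := (Nat.le_log2 (by omega)).2 (by simpa using hm)
      have h2 := Nat.log_div_base 2 m
      simp only [Nat.log2_eq_log_two] at *
      omega
    have e : n / 2 / 2 / 2 / 2 / 2 / 2 / 2 / 2 = n / 256 := by omega
    rw [step n (by omega), step (n/2) (by omega), step (n/2/2) (by omega),
        step (n/2/2/2) (by omega), step (n/2/2/2/2) (by omega),
        step (n/2/2/2/2/2) (by omega), step (n/2/2/2/2/2/2) (by omega),
        step (n/2/2/2/2/2/2/2) (by omega), e]
  unfold pvByteLen pvBitLength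
  have hn0 : n ≠ 0 := by omega
  simp only [hn0, if_false, h, if_false]
  omega

lemma pvShiftR_eq (n k : Nat) : n >>> k = n / 2 ^ k := Nat.shiftRight_eq_div_pow n k

-- B's payload unfolds one byte at a time, matching A's loop step
lemma pvToBytesLE_succ (n len : Nat) :
    pvToBytesLE n (len + 1) = (n % 256) :: pvToBytesLE (n / 256) len := by
  unfold pvToBytesLE
  rw [List.range_succ_eq_map]
  simp only [List.map_cons, List.map_map]
  congr 1
  simp only [pvShiftR_eq]
  apply List.map_congr_left
  intro i _
  simp only [Function.comp_apply]
  rw [Nat.div_div_eq_div_mul]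
  congr 1
  rw [show 8 * (i + 1) = 8 * i + 8 by ring, Nat.pow_add]
  norm_num [Nat.mul_comm]

-- the heart: A's loop output equals B's bulk conversion
lemma pvALoop_eq_toBytes (n : Nat) : pvALoop n = pvToBytesLE n (pvByteLen n) := by
  induction n using Nat.strong_induction_on with
  | _ n ih =>
    rw [pvALoop]
    split
    · next h =>
      rw [pvByteLen_small h]
      unfold pvToBytesLE
      simp [pvShiftR_eq]
    · next h =>
      rw [pvByteLen_step h]
      rw [pvToBytesLE_succ]
      congr 1
      exact ih (n / 256) (Nat.div_lt_self (by omega) (by omega))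

lemma pvToBytesLE_length (n len : Nat) : (pvToBytesLE n len).length = len := by
  unfold pvToBytesLE; simp

-- ===== VERDICT (by name: the statement is the Claim_ definition above) =====
theorem encode_height_to_coinbase_py_spec : Claim_equal_encode_height_to_coinbase_py := by
  intro height _ hpre
  unfold Spec_encode_height_to_coinbase_py
  unfold encode_height_to_coinbase_py encode_height_to_coinbase_py_alt
  rw [if_neg (by exact not_lt.mpr hpre)]
  simp only [pvALoop_eq_toBytes, pvToBytesLE_length, pvByteLen]
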